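-- pv_equiv track=rewrite | github.com/stm29/Scripts | convert_binary_string_to_0.py | odd
-- ===== SOURCE A (Python) =====
-- def odd(s):
--     l=list(s)
--     for i in range(len(s)-1,0,-1):
--         if l[i] == '1':
--             l[i] = '0'
--             break
--         else:
--             l[i]='1'
--     return "".join(l)
-- ===== SOURCE B (Python) =====
-- def odd(s):
--     if not s:
--         return s
--     confirmed = []   # s[1:] up to and including the last '1' seen so far (unchanged)
--     pending = []     # chars seen after the last '1'
--     for c in s[1:]:
--         if c == '1':
--             confirmed += pending
--             confirmed.append('1')
--             pending = []
--         else: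
--             pending.append(c)
--     if confirmed:
--         confirmed[-1] = '0'
--         return s[0] + ''.join(confirmed) + '1' * len(pending)
--     return s[0] + '1' * len(pending)
-- ===== Notes on version B (the rewrite author's own statement) =====
-- stated objective: alternative
-- what changed: Replaces A's backward index loop that mutates a char list in place with a single LEFT-TO-RIGHT fold over s[1:] maintaining two accumulators (confirmed prefix up to the last '1' seen, pending chars after it), then assembles the result from them.
import Mathlib
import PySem

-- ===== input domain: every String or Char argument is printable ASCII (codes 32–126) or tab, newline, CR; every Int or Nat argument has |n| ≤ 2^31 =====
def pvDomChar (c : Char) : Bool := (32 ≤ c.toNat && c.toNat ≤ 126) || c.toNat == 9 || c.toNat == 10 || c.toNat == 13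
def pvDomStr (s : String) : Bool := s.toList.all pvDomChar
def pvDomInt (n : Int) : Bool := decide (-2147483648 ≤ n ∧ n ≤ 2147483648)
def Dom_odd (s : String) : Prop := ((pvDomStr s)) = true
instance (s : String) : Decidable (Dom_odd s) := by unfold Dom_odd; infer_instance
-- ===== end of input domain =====

-- B replaces A's backward in-place mutation loop by a single left-to-right fold over s[1:]
-- with two accumulators (confirmed prefix / pending tail), then assembles the result
-- (objective: alternative decomposition, same O(n) cost).

-- ===== PORT A =====
-- the for-loop over range(len(s)-1, 0, -1) with break, as structural recursion on the index
def oddLoop (l : List Char) : Nat → List Char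
  | 0 => l
  | (n+1) =>
      if l.getD (n+1) ' ' = '1' then l.set (n+1) '0'
      else oddLoop (l.set (n+1) '1') n

def odd (s : String) : String :=
  let l := s.toList
  String.ofList (oddLoop l (l.length - 1))

-- ===== PORT B =====
-- the loop body of B: state = (confirmed, pending)
def oddStep (st : List Char × List Char) (c : Char) : List Char × List Char :=
  if c = '1' then (st.1 ++ st.2 ++ ['1'], []) else (st.1, st.2 ++ [c])

def odd_alt (s : String) : String :=
  match s.toList with
  | [] => s
  | h :: t =>
    let st := t.foldl oddStep ([], [])
    if st.1 = [] then String.ofList (h :: List.replicate st.2.length '1')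
    else String.ofList (h :: (st.1.dropLast ++ '0' :: List.replicate st.2.length '1'))

-- ===== PRECONDITION & SPEC =====
def Spec_odd (s : String) (out : String) : Prop := out = odd_alt s
instance (s : String) (out : String) : Decidable (Spec_odd s out) := by unfold Spec_odd; infer_instance

-- ===== CLAIM (what is proved, stated in full; the proofs are below) =====
def Claim_equal_odd : Prop := ∀ (s : String), Dom_odd s → Spec_odd s (odd s)

-- ===== LEMMAS AND PROOFS =====

-- A's loop only touches indices ≤ n, so a char appended past them rides along
theorem oddLoop_append (c : Char) (n : Nat) : ∀ (l : List Char), n < l.length →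
    oddLoop (l ++ [c]) n = oddLoop l n ++ [c] := by
  induction n with
  | zero => intro l _; simp [oddLoop]
  | succ m ih =>
    intro l hl
    unfold oddLoop
    have hget : (l ++ [c]).getD (m+1) ' ' = l.getD (m+1) ' ' := by
      simp [List.getD, List.getElem?_append_left hl]
    have hset : ∀ x, (l ++ [c]).set (m+1) x = l.set (m+1) x ++ [c] := by
      intro x; rw [List.set_append_left _ _ hl]
    simp only [List.getD] at hget ⊢
    simp only [hget, hset]
    rw [ih (l.set (m+1) '1') (by simpa using Nat.lt_of_succ_lt hl)]
    split <;> rfl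

-- the fold's invariant: confirmed ++ pending is exactly the input consumed so far
theorem oddStep_inv : ∀ (t : List Char) (st : List Char × List Char),
    (t.foldl oddStep st).1 ++ (t.foldl oddStep st).2 = st.1 ++ st.2 ++ t := by
  intro t
  induction t with
  | nil => intro st; simp
  | cons c t ih =>
    intro st
    simp only [List.foldl_cons, ih]
    by_cases hc : c = '1' <;> simp [oddStep, hc]

-- reading B's assembly out of the fold state
def oddOut (st : List Char × List Char) : List Char :=
  if st.1 = [] then List.replicate st.2.length '1'
  else st.1.dropLast ++ '0' :: List.replicate st.2.length '1'

theorem oddLoop_eq_fold (h : Char) (t : List Char) :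
    oddLoop (h :: t) t.length = h :: oddOut (t.foldl oddStep ([], [])) := by
  induction t using List.reverseRecOn with
  | nil => simp [oddLoop, oddOut]
  | append_singleton t' c ih =>
    have hl : (h :: (t' ++ [c])) = (h :: t') ++ [c] := by simp
    have hlen : (t' ++ [c]).length = t'.length + 1 := by simp
    rw [hl, hlen]
    unfold oddLoop
    have hget : ((h :: t') ++ [c]).getD (t'.length + 1) ' ' = c := by
      simp [List.getD]
    have hset : ∀ x, ((h :: t') ++ [c]).set (t'.length + 1) x = (h :: t') ++ [x] := by
      intro x
      rw [List.set_append_right _ _ (by simp)]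
      simp
    simp only [List.getD] at hget ⊢
    simp only [hget, hset]
    rw [List.foldl_append]
    by_cases hc : c = '1'
    · simp only [hc, if_pos rfl]
      have hst := oddStep_inv t' ([], [])
      simp only [List.nil_append] at hst
      rw [show List.foldl oddStep (List.foldl oddStep ([], []) t') ['1']
            = ((List.foldl oddStep ([], []) t').1 ++ (List.foldl oddStep ([], []) t').2 ++ ['1'], [])
          from by simp [oddStep]]
      unfold oddOut
      simp [hst]
    · simp only [if_neg hc]
      rw [oddLoop_append '1' t'.length (h :: t') (by simp), ih]
      simp only [List.foldl_cons, List.foldl_nil, oddStep, if_neg hc]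
      unfold oddOut
      by_cases h1 : (List.foldl oddStep ([], []) t').1 = [] <;>
        simp [h1, List.replicate_succ' (n := (List.foldl oddStep ([], []) t').2.length)]

-- ===== VERDICT (by name: the statement is the Claim_ definition above) =====
theorem odd_spec : Claim_equal_odd := by
  intro s _
  unfold Spec_odd odd odd_alt
  simp only
  match hm : s.toList with
  | [] =>
    have hs : s = "" := by simpa using congrArg String.ofList hm
    simp [oddLoop, hs]
  | h :: t =>
    have : (h :: t).length - 1 = t.length := by simp
    rw [this, oddLoop_eq_fold]
    unfold oddOut
    split <;> simp_all
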